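-- pv_equiv track=rewrite | github.com/jsgoldstein/hammurabis-code | advent_of_code/2015/naughty-day5.py | naughty_pairs
-- ===== SOURCE A (Python) =====
-- def naughty_pairs(string: str) -> bool:
--     pairs = ('ab', 'cd', 'pq', 'xy')
--     index = 0
--     while index < len(string) - 1:
--         if string[index:index + 2] in pairs:
--             return True
--         index = index + 1
--     return False
-- ===== SOURCE B (Python) =====
-- def naughty_pairs(string: str) -> bool:
--     return any(p in string for p in ('ab', 'cd', 'pq', 'xy'))
-- ===== Notes on version B (the rewrite author's own statement) =====
-- stated objective: idiomatic
-- what changed: B replaces A's single left-to-right index loop over all positions (slicing a 2-char window and testing it against the tuple) with one substring search per forbidden pattern via any(p in string ...); no index or window is maintained.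
import Mathlib
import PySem

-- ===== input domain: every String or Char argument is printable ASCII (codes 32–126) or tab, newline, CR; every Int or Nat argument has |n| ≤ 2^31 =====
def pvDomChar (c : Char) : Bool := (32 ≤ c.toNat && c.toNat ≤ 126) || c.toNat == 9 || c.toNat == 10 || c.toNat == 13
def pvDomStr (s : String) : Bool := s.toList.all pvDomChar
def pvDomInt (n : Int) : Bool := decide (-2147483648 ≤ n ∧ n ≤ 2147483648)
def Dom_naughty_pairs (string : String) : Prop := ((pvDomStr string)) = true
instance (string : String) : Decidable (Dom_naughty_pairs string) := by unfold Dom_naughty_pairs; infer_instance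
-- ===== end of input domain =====

-- B is the idiomatic any(pattern in string) form: one substring search per forbidden
-- pattern instead of A's index loop slicing a 2-char window at every position.

-- ===== PORT A =====
-- A's while loop: at index i it tests the 2-char slice against the tuple of pairs;
-- advancing the index by one is the structural step from (a :: b :: rest) to (b :: rest).
def pvScanA : List Char → Bool
  | a :: b :: rest =>
      if [['a','b'], ['c','d'], ['p','q'], ['x','y']].contains [a, b] then true
      else pvScanA (b :: rest)
  | _ => false

def naughty_pairs (string : String) : Bool := pvScanA string.toList

-- ===== PORT B =====
def naughty_pairs_alt (string : String) : Bool :=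
  ["ab", "cd", "pq", "xy"].any (fun p => PySem.Str.isIn p string)

-- ===== PRECONDITION & SPEC =====
def Spec_naughty_pairs (string : String) (out : Bool) : Prop := out = naughty_pairs_alt string
instance (string : String) (out : Bool) : Decidable (Spec_naughty_pairs string out) := by unfold Spec_naughty_pairs; infer_instance

-- ===== CLAIM (what is proved, stated in full; the proofs are below) =====
def Claim_equal_naughty_pairs : Prop := ∀ (string : String), Dom_naughty_pairs string → Spec_naughty_pairs string (naughty_pairs string)

-- ===== LEMMAS AND PROOFS =====

theorem pvInfixPair (x y a b : Char) (rest : List Char) :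
    [x, y] <:+: a :: b :: rest ↔ (x = a ∧ y = b) ∨ [x, y] <:+: b :: rest := by
  rw [List.infix_cons_iff]
  simp [List.cons_prefix_cons]

theorem pvNotInfixSingle (x y a : Char) : ¬ [x, y] <:+: [a] := by
  intro h
  have := h.length_le
  simp at this

set_option maxHeartbeats 1000000 in
theorem pvScanA_iff (l : List Char) :
    pvScanA l = true ↔
      (['a','b'] <:+: l ∨ ['c','d'] <:+: l ∨ ['p','q'] <:+: l ∨ ['x','y'] <:+: l) := by
  induction l with
  | nil => simp [pvScanA]
  | cons a t ih =>
    cases t with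
    | nil =>
      rw [show pvScanA [a] = false from rfl]
      simp only [Bool.false_eq_true, false_iff]
      rintro (h | h | h | h) <;> exact pvNotInfixSingle _ _ _ h
    | cons b rest =>
      have hp : pvScanA (a :: b :: rest) =
          (([[('a':Char),'b'], ['c','d'], ['p','q'], ['x','y']].contains [a, b]) ||
            pvScanA (b :: rest)) := by
        simp only [pvScanA]
        cases h : [[('a':Char),'b'], ['c','d'], ['p','q'], ['x','y']].contains [a, b] <;>
          simp [h]
      rw [hp, Bool.or_eq_true, ih,
        pvInfixPair 'a' 'b' a b rest, pvInfixPair 'c' 'd' a b rest,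
        pvInfixPair 'p' 'q' a b rest, pvInfixPair 'x' 'y' a b rest]
      simp only [List.contains_eq_mem, List.mem_cons, List.not_mem_nil, or_false,
        List.cons.injEq, and_true, true_and, decide_eq_true_eq]
      tauto

-- ===== VERDICT (by name: the statement is the Claim_ definition above) =====
theorem naughty_pairs_spec : Claim_equal_naughty_pairs := by
  intro s _
  unfold Spec_naughty_pairs naughty_pairs naughty_pairs_alt
  rw [Bool.eq_iff_iff, pvScanA_iff]
  simp [PySem.Chars.isIn_iff_infix]
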